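-- pv_equiv track=rewrite | github.com/Yotchko/puissance4-project | main.py | check_horizontal_win
-- ===== SOURCE A (Python) =====
-- def check_horizontal_win(grid, token):
--     """
--     Vérifie si le joueur avec le jeton donné a 4 jetons consécutifs horizontalement.
--     Retourne True si victoire, False sinon.
--     """
--     for row in grid:
--         count = 0  # compteur de jetons consécutifs
--         for cell in row:
--             if cell == token:
--                 count += 1
--                 if count == 4:
--                     return True  # victoire trouvée
--             else:
--                 count = 0  # reset si cellule différente
--     return False  # aucune victoire horizontale
-- ===== SOURCE B (Python) =====
-- def check_horizontal_win(grid, token):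
--     for row in grid:
--         n = len(row)
--         i = 0
--         while i < n:
--             j = i
--             while j < n and row[j] == row[i]:
--                 j += 1
--             if row[i] == token and j - i >= 4:
--                 return True
--             i = j
--     return False
-- ===== Notes on version B (the rewrite author's own statement) =====
-- stated objective: alternative
-- what changed: B scans each row as maximal runs of equal cells with a two-pointer run scan and checks each run's key and length, instead of A's running consecutive-token counter with reset.
import Mathlib
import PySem

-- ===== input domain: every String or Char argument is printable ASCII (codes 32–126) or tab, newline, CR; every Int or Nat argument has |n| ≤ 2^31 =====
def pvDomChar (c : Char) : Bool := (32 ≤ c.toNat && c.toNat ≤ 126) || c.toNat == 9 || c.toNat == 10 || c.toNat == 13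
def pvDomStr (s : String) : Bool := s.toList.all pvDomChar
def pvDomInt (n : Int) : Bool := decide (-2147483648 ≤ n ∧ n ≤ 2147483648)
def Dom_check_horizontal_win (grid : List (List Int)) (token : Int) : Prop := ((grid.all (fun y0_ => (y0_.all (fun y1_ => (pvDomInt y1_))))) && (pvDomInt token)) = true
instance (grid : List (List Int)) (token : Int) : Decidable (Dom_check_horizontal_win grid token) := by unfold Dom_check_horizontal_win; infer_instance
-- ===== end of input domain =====

-- B replaces A's running consecutive-token counter by a per-row scan over maximal runs of
-- equal cells (two pointers in Python; takeWhile/dropWhile here), checking each run's key and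
-- length: an alternative decomposition of the same cost.


-- ===== PORT A =====
-- inner loop of A: running counter of consecutive tokens, early return at 4, reset on mismatch
def pvRowA (token : Int) : List Int → Nat → Bool
  | [], _ => false
  | cell :: rest, count =>
      if cell = token then
        if count + 1 = 4 then true else pvRowA token rest (count + 1)
      else
        pvRowA token rest 0

def check_horizontal_win (grid : List (List Int)) (token : Int) : Bool :=
  grid.any (fun row => pvRowA token row 0)

-- ===== PORT B =====
-- inner loop of B: run scan; 'while j < n and row[j] == row[i]' is the takeWhile (the run's
-- length), and continuing from index j is the dropWhile
def pvRowB (token : Int) : List Int → Bool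
  | [] => false
  | c :: rest =>
      if c = token ∧ 4 ≤ (rest.takeWhile (fun x => x == c)).length + 1 then true
      else pvRowB token (rest.dropWhile (fun x => x == c))
termination_by xs => xs.length
decreasing_by
  simpa using Nat.lt_succ_of_le (List.length_dropWhile_le (fun x => x == c) rest)

def check_horizontal_win_alt (grid : List (List Int)) (token : Int) : Bool :=
  grid.any (fun row => pvRowB token row)

-- ===== PRECONDITION & SPEC =====
def Spec_check_horizontal_win (grid : List (List Int)) (token : Int) (out : Bool) : Prop := out = check_horizontal_win_alt grid token
instance (grid : List (List Int)) (token : Int) (out : Bool) : Decidable (Spec_check_horizontal_win grid token out) := by unfold Spec_check_horizontal_win; infer_instance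

-- ===== CLAIM (what is proved, stated in full; the proofs are below) =====
def Claim_equal_check_horizontal_win : Prop := ∀ (grid : List (List Int)) (token : Int), Dom_check_horizontal_win grid token → Spec_check_horizontal_win grid token (check_horizontal_win grid token)

-- ===== LEMMAS AND PROOFS =====

theorem pvRowA_run (token : Int) (p q : List Int) (k : Nat) (hk : k < 4)
    (hp : ∀ x ∈ p, x = token) :
    pvRowA token (p ++ q) k = if 4 ≤ k + p.length then true else pvRowA token q (k + p.length) := by
  induction p generalizing k with
  | nil => simp [hk.not_ge]
  | cons c p ih =>
    have hc : c = token := hp c (by simp)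
    have hrest : ∀ x ∈ p, x = token := fun x hx => hp x (List.mem_cons_of_mem _ hx)
    by_cases h4 : k + 1 = 4
    · simp [pvRowA, hc, h4]
      exact Or.inl (by omega)
    · have step : pvRowA token ((c :: p) ++ q) k = pvRowA token (p ++ q) (k + 1) := by
        simp [pvRowA, hc, h4]
      rw [step, ih (k + 1) (by omega) hrest]
      have e : k + 1 + p.length = k + (c :: p).length := by
        simp only [List.length_cons]; omega
      rw [e]

theorem pvRowA_skip (token : Int) (p q : List Int)
    (hp : ∀ x ∈ p, x ≠ token) :
    pvRowA token (p ++ q) 0 = pvRowA token q 0 := by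
  induction p with
  | nil => rfl
  | cons c p ih =>
    have hc : c ≠ token := hp c (by simp)
    simpa [pvRowA, hc] using ih (fun x hx => hp x (List.mem_cons_of_mem _ hx))

theorem pvRow_eq (token : Int) (row : List Int) : pvRowA token row 0 = pvRowB token row := by
  induction row using pvRowB.induct token with
  | case1 => simp [pvRowA, pvRowB]
  | case2 c rest h =>
    obtain ⟨hc, hrun⟩ := h
    have hp : ∀ x ∈ c :: rest.takeWhile (fun x => x == c), x = token := by
      intro x hx
      rcases List.mem_cons.mp hx with h | h
      · exact h ▸ hc
      · have := List.mem_takeWhile_imp h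
        simp only [beq_iff_eq] at this
        exact this ▸ hc
    have hdecomp : c :: rest
        = (c :: rest.takeWhile (fun x => x == c)) ++ rest.dropWhile (fun x => x == c) := by
      simp
    rw [hdecomp, pvRowA_run token _ _ 0 (by omega) hp,
        if_pos (by simp only [List.length_cons]; omega)]
    have h3 : 3 ≤ (rest.takeWhile (fun x => x == c)).length := by omega
    conv_rhs => rw [pvRowB.eq_def]
    simp [hc]
    exact Or.inl (hc ▸ h3)
  | case3 c rest h ih =>
    by_cases hc : c = token
    · have hrun : ¬ 4 ≤ (rest.takeWhile (fun x => x == c)).length + 1 := fun hr => h ⟨hc, hr⟩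
      have hp : ∀ x ∈ c :: rest.takeWhile (fun x => x == c), x = token := by
        intro x hx
        rcases List.mem_cons.mp hx with h | h
        · exact h ▸ hc
        · have := List.mem_takeWhile_imp h
          simp only [beq_iff_eq] at this
          exact this ▸ hc
      have hdecomp : c :: rest
          = (c :: rest.takeWhile (fun x => x == c)) ++ rest.dropWhile (fun x => x == c) := by
        simp
      rw [hdecomp, pvRowA_run token _ _ 0 (by omega) hp,
          if_neg (by simp only [List.length_cons]; omega)]
      -- the tail starts with a non-token (or is empty), so the incoming counter is irrelevant
      have htail : ∀ m, pvRowA token (rest.dropWhile (fun x => x == c)) m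
          = pvRowA token (rest.dropWhile (fun x => x == c)) 0 := by
        intro m
        cases hq : rest.dropWhile (fun x => x == c) with
        | nil => rfl
        | cons d q' =>
          have hne : rest.dropWhile (fun x => x == c) ≠ [] := by simp [hq]
          have hd := List.head_dropWhile_not (fun x => x == c) hne
          simp only [hq, List.head_cons] at hd
          have hd' : d ≠ token := by simpa [hc] using hd
          simp [pvRowA, hd']
      rw [htail, ih]
      have h3 : ¬ 3 ≤ (rest.takeWhile (fun x => x == c)).length := by omega
      conv_rhs => rw [pvRowB.eq_def]
      simp [h3]
    · have hp : ∀ x ∈ c :: rest.takeWhile (fun x => x == c), x ≠ token := by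
        intro x hx
        rcases List.mem_cons.mp hx with h | h
        · exact h ▸ hc
        · have := List.mem_takeWhile_imp h
          simp only [beq_iff_eq] at this
          exact this ▸ hc
      have hdecomp : c :: rest
          = (c :: rest.takeWhile (fun x => x == c)) ++ rest.dropWhile (fun x => x == c) := by
        simp
      rw [hdecomp, pvRowA_skip token _ _ hp, ih]
      conv_rhs => rw [pvRowB.eq_def]
      simp [hc]

-- ===== VERDICT (by name: the statement is the Claim_ definition above) =====
theorem check_horizontal_win_spec : Claim_equal_check_horizontal_win := by
  intro grid token _
  unfold Spec_check_horizontal_win check_horizontal_win check_horizontal_win_alt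
  simp [pvRow_eq]
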